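-- pv_equiv track=rewrite | github.com/jsonidx/signal_engine_v1 | catalyst_screener.py | _rank_annotation
-- ===== SOURCE A (Python) =====
-- from typing import Dict, List, Optional, Tuple
--
-- def _rank_annotation(ticker: str, history: dict) -> Tuple[str, str]:
--     """
--     Returns (arrow_str, note_str) for a ticker based on its history.
--     arrow_str: '↑3', '↓1', '→'
--     note_str:  ' 🔥 deep dive candidate' if 2+ consecutive rank rises, else ''
--     """
--     entries = history.get(ticker, [])
--     if not entries:
--         return "NEW", ""
--
--     delta = entries[-1].get("delta", 0)
--     if delta > 0:
--         arrow = f"↑{delta}"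
--     elif delta < 0:
--         arrow = f"↓{abs(delta)}"
--     else:
--         arrow = "→"
--
--     # Count consecutive rank rises (positive delta) from the tail
--     consec_rises = 0
--     for e in reversed(entries):
--         if e.get("delta", 0) > 0:
--             consec_rises += 1
--         else:
--             break
--
--     note = " 🔥 deep dive candidate" if consec_rises >= 2 else ""
--     return arrow, note
-- ===== SOURCE B (Python) =====
-- from typing import Tuple
--
-- def _rank_annotation(ticker: str, history: dict) -> Tuple[str, str]:
--     entries = history.get(ticker, [])
--     if not entries:
--         return "NEW", ""
--
--     last = entries[-1].get("delta", 0)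
--     if last > 0:
--         arrow = f"↑{last}"
--     elif last < 0:
--         arrow = f"↓{-last}"
--     else:
--         arrow = "→"
--
--     # closed form: 2+ consecutive tail rises <=> the last two deltas are positive
--     hot = len(entries) >= 2 and last > 0 and entries[-2].get("delta", 0) > 0
--     return arrow, " 🔥 deep dive candidate" if hot else ""
-- ===== Notes on version B (the rewrite author's own statement) =====
-- stated objective: simpler
-- what changed: The reversed-loop counter of consecutive positive deltas is replaced by a closed-form check on the last two entries (count >= 2 iff entries[-1] and entries[-2] both have positive delta), removing the loop entirely.
import Mathlib
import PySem

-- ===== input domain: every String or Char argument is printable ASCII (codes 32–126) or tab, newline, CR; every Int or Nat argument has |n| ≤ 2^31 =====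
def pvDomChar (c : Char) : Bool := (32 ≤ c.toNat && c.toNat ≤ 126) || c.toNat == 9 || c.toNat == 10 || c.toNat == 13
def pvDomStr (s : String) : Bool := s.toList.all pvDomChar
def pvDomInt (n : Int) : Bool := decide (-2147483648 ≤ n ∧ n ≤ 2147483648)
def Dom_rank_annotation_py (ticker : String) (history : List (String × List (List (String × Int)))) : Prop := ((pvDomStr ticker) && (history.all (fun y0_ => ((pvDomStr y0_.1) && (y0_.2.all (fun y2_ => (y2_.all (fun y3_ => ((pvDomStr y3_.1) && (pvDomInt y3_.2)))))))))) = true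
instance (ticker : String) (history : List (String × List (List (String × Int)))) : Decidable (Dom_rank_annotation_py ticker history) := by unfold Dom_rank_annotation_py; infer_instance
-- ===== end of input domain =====

-- B replaces A's reversed-loop counter of consecutive positive deltas by a closed-form
-- check of the last two entries' deltas (objective: simpler).

-- ===== PORT A =====
-- the 'for e in reversed(entries): … else: break' counter
def pvCountRises : List (List (String × Int)) → Int
  | [] => 0
  | e :: rest => if 0 < PySem.Dict.getD ⟨e⟩ "delta" 0 then pvCountRises rest + 1 else 0

def rank_annotation_py (ticker : String) (history : List (String × List (List (String × Int)))) : String × String :=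
  let entries := PySem.Dict.getD ⟨history⟩ ticker []
  if entries = [] then ("NEW", "")
  else
    let delta := PySem.Dict.getD ⟨(PySem.List.pyGet? entries (-1)).getD []⟩ "delta" 0
    let arrow := if 0 < delta then "↑" ++ PySem.Int.toStr delta
      else if delta < 0 then "↓" ++ PySem.Int.toStr |delta|
      else "→"
    let note := if 2 ≤ pvCountRises entries.reverse then " 🔥 deep dive candidate" else ""
    (arrow, note)

-- ===== PORT B =====
def rank_annotation_py_alt (ticker : String) (history : List (String × List (List (String × Int)))) : String × String :=
  let entries := PySem.Dict.getD ⟨history⟩ ticker []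
  if entries = [] then ("NEW", "")
  else
    let last := PySem.Dict.getD ⟨(PySem.List.pyGet? entries (-1)).getD []⟩ "delta" 0
    let arrow := if 0 < last then "↑" ++ PySem.Int.toStr last
      else if last < 0 then "↓" ++ PySem.Int.toStr (-last)
      else "→"
    let hot := 2 ≤ entries.length ∧ 0 < last ∧
      0 < PySem.Dict.getD ⟨(PySem.List.pyGet? entries (-2)).getD []⟩ "delta" 0
    (arrow, if hot then " 🔥 deep dive candidate" else "")

-- ===== PRECONDITION & SPEC =====
def Spec_rank_annotation_py (ticker : String) (history : List (String × List (List (String × Int)))) (out : String × String) : Prop := out = rank_annotation_py_alt ticker history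
instance (ticker : String) (history : List (String × List (List (String × Int)))) (out : String × String) : Decidable (Spec_rank_annotation_py ticker history out) := by unfold Spec_rank_annotation_py; infer_instance

-- ===== CLAIM (what is proved, stated in full; the proofs are below) =====
def Claim_equal_rank_annotation_py : Prop := ∀ (ticker : String) (history : List (String × List (List (String × Int)))), Dom_rank_annotation_py ticker history → Spec_rank_annotation_py ticker history (rank_annotation_py ticker history)

-- ===== LEMMAS AND PROOFS =====
theorem pvCountRises_nonneg (l : List (List (String × Int))) : 0 ≤ pvCountRises l := by
  induction l with
  | nil => simp [pvCountRises]
  | cons e rest ih => simp only [pvCountRises]; split <;> omega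

theorem pv_note_iff (xs : List (List (String × Int))) (a : List (String × Int)) :
    (2 ≤ pvCountRises (xs ++ [a]).reverse) ↔
    (2 ≤ (xs ++ [a]).length ∧ 0 < PySem.Dict.getD ⟨a⟩ "delta" 0 ∧
      0 < PySem.Dict.getD ⟨(PySem.List.pyGet? (xs ++ [a]) (-2)).getD []⟩ "delta" 0) := by
  induction xs using List.reverseRecOn with
  | nil =>
    simp [pvCountRises, PySem.List.pyGet?]
    split <;> omega
  | append_singleton ys b _ =>
    have h2 : PySem.List.pyGet? ((ys ++ [b]) ++ [a]) (-2) = some b := by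
      rw [PySem.List.pyGet?_neg_ofNat ((ys ++ [b]) ++ [a]) 2 (by omega) (by simp)]
      simp
    rw [h2]
    have hc := pvCountRises_nonneg ys.reverse
    simp only [List.reverse_append, List.reverse_cons, List.reverse_nil, List.nil_append,
      List.cons_append, pvCountRises, List.length_append, List.length_cons]
    simp only [Option.getD_some]
    split <;> omega

-- ===== VERDICT (by name: the statement is the Claim_ definition above) =====
theorem rank_annotation_py_spec : Claim_equal_rank_annotation_py := by
  intro ticker history _
  unfold Spec_rank_annotation_py rank_annotation_py rank_annotation_py_alt
  generalize (PySem.Dict.getD ⟨history⟩ ticker ([] : List (List (String × Int)))) = entries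
  induction entries using List.reverseRecOn with
  | nil => rfl
  | append_singleton xs a _ =>
    have hne : xs ++ [a] ≠ [] := by simp
    have hlast : PySem.List.pyGet? (xs ++ [a]) (-1) = some a :=
      PySem.List.pyGet?_neg_one_append_singleton xs a
    simp only [if_neg hne, hlast, Option.getD_some]
    refine Prod.ext ?_ ?_
    · simp only
      split_ifs with h1 h2 <;> try rfl
      rw [abs_of_neg h2]
    · simp only
      rw [if_congr (pv_note_iff xs a) rfl rfl]
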